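-- pv_equiv track=rewrite | github.com/BingoWon/mcp-crawl4ai-rag | src/chunking/chunker.py | _extract_overview_for_h3
-- ===== SOURCE A (Python) =====
-- def _extract_overview_for_h3(text: str) -> str:
--     """H3分割时的Overview提取：到###停止或文档末尾"""
--     lines = text.split('\n')
--     overview_lines = []
--     in_overview = False
--
--     for line in lines:
--         if line.strip() == '## Overview':  # 找到Overview开始
--             in_overview = True
--             overview_lines.append(line)
--         elif in_overview and line.startswith('### '):  # 遇到第一个H3时停止
--             break
--         elif in_overview:
--             overview_lines.append(line)
--
--     return '\n'.join(overview_lines) if overview_lines else ""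
-- ===== SOURCE B (Python) =====
-- def _extract_overview_for_h3(text: str) -> str:
--     lines = text.split('\n')
--     i = next((k for k, line in enumerate(lines) if line.strip() == '## Overview'), None)
--     if i is None:
--         return ""
--     j = next((k for k in range(i + 1, len(lines)) if lines[k].startswith('### ')), len(lines))
--     return '\n'.join(lines[i:j])
-- ===== Notes on version B (the rewrite author's own statement) =====
-- stated objective: simpler
-- what changed: Replaces the stateful accumulate-while-in-section loop (flag + growing list) by locating the two boundaries (first '## Overview' line, then the first following '### ' line) and returning one slice of the line list.
import Mathlib
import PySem

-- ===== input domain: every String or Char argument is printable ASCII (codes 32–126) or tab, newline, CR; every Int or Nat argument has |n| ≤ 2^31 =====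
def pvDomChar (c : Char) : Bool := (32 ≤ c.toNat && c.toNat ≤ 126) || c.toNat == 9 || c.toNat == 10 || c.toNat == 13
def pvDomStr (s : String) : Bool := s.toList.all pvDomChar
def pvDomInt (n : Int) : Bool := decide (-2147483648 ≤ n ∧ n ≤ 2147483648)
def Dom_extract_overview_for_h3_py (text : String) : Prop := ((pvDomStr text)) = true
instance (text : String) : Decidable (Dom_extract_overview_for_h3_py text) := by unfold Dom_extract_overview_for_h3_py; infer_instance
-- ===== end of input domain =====

-- B locates the two section boundaries and returns one slice of the line list, instead of A's stateful accumulate-while-in-section loop; same cost, simpler.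

-- ===== PORT A =====
-- A's for-loop: state = (accumulated overview_lines, in_overview flag); `break` = return acc
def pvALoop : List String → List String → Bool → List String
  | [], acc, _ => acc
  | l :: rest, acc, inOv =>
    if PySem.Str.strip l == "## Overview" then pvALoop rest (acc ++ [l]) true
    else if inOv && PySem.Str.startswith l "### " then acc
    else if inOv then pvALoop rest (acc ++ [l]) inOv
    else pvALoop rest acc inOv

def extract_overview_for_h3_py (text : String) : String :=
  let lines := (PySem.Str.split? text "\n").getD []   -- sep "\n" ≠ "": split? is some here, exactly text.split('\n')
  let overview_lines := pvALoop lines [] false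
  if overview_lines.isEmpty then "" else PySem.Str.join "\n" overview_lines

-- ===== PORT B =====
def extract_overview_for_h3_py_alt (text : String) : String :=
  let lines := (PySem.Str.split? text "\n").getD []   -- sep "\n" ≠ "": split? is some here, exactly text.split('\n')
  match lines.findIdx? (fun l => PySem.Str.strip l == "## Overview") with
  | none => ""
  | some i =>
    let j := match (lines.drop (i+1)).findIdx? (fun l => PySem.Str.startswith l "### ") with
      | none => lines.length
      | some k => i + 1 + k
    PySem.Str.join "\n" ((lines.take j).drop i)

-- ===== PRECONDITION & SPEC =====
def Spec_extract_overview_for_h3_py (text : String) (out : String) : Prop := out = extract_overview_for_h3_py_alt text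
instance (text : String) (out : String) : Decidable (Spec_extract_overview_for_h3_py text out) := by unfold Spec_extract_overview_for_h3_py; infer_instance

-- ===== CLAIM (what is proved, stated in full; the proofs are below) =====
def Claim_equal_extract_overview_for_h3_py : Prop := ∀ (text : String), Dom_extract_overview_for_h3_py text → Spec_extract_overview_for_h3_py text (extract_overview_for_h3_py text)

-- ===== LEMMAS AND PROOFS =====

-- once in_overview is set, A appends every further line up to (excluding) the first '### ' line
lemma pvALoop_true (ls : List String) : ∀ (acc : List String),
    pvALoop ls acc true =
      acc ++ ls.takeWhile (fun l => (PySem.Str.strip l == "## Overview") || !PySem.Chars.startswith l.toList ['#', '#', '#', ' ']) := by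
  induction ls with
  | nil => intro acc; simp [pvALoop]
  | cons l rest ih =>
    intro acc
    by_cases hp : (PySem.Str.strip l == "## Overview") = true
    · simp [pvALoop, hp, ih]
    · by_cases hq : PySem.Chars.startswith l.toList ['#', '#', '#', ' '] = true
      · simp [pvALoop, hp, hq]
      · simp [pvALoop, hp, hq, ih]

lemma pv_rstrip_prefix (xs : List Char) : PySem.Chars.rstrip xs <+: xs := by
  have h := List.dropWhile_suffix (l := xs.reverse) (p := PySem.Chars.isspace)
  have := h.reverse
  simpa [PySem.Chars.rstrip] using this

-- a line that strips to "## Overview" cannot start with "### "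
lemma pv_no_overlap (l : String) (h : (PySem.Str.strip l == "## Overview") = true) :
    PySem.Chars.startswith l.toList ['#', '#', '#', ' '] = false := by
  cases hs : PySem.Chars.startswith l.toList ['#', '#', '#', ' '] with
  | false => rfl
  | true =>
    exfalso
    have hpre : ['#', '#', '#', ' '] <+: l.toList := (PySem.Chars.startswith_iff _ _).1 hs
    obtain ⟨t, ht⟩ := hpre
    have he : (PySem.Str.strip l).toList = "## Overview".toList := by
      rw [(beq_iff_eq).1 h]
    rw [PySem.Str.toList_strip] at he
    rw [← ht] at he
    have hl : PySem.Chars.lstrip (['#', '#', '#', ' '] ++ t) = ['#', '#', '#', ' '] ++ t := by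
      simp [PySem.Chars.lstrip, show PySem.Chars.isspace '#' = false from by decide]
    rw [PySem.Chars.strip, hl] at he
    have hp2 := pv_rstrip_prefix (['#', '#', '#', ' '] ++ t)
    rw [he] at hp2
    obtain ⟨u, hu⟩ := hp2
    rw [show "## Overview".toList = ['#', '#', ' ', 'O', 'v', 'e', 'r', 'v', 'i', 'e', 'w'] from by decide] at hu
    simp at hu

-- the collected tail equals a take up to the first '### ' line
lemma pv_takeWhile_eq (ls : List String) :
    ls.takeWhile (fun l => (PySem.Str.strip l == "## Overview") || !PySem.Chars.startswith l.toList ['#', '#', '#', ' '])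
      = match ls.findIdx? (fun l => PySem.Chars.startswith l.toList ['#', '#', '#', ' ']) with
        | none => ls
        | some k => ls.take k := by
  induction ls with
  | nil => simp
  | cons l rest ih =>
    by_cases hq : PySem.Chars.startswith l.toList ['#', '#', '#', ' '] = true
    · have hp : (PySem.Str.strip l == "## Overview") = false := by
        cases h : (PySem.Str.strip l == "## Overview") with
        | true => exact absurd (pv_no_overlap l h) (by simp [hq])
        | false => rfl
      simp [List.findIdx?_cons, hp, hq]
    · simp [List.findIdx?_cons, hq, ih]
      generalize List.findIdx? (fun l => PySem.Chars.startswith l.toList ['#', '#', '#', ' ']) rest = o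
      cases o <;> simp

lemma pv_econv :
    (fun l => PySem.Str.startswith l "### ") = (fun l => PySem.Chars.startswith l.toList ['#', '#', '#', ' ']) := by
  funext x; simp

-- A's whole computation on the line list equals B's boundary-and-slice computation
lemma pv_core (lines : List String) :
    (if (pvALoop lines [] false).isEmpty then "" else PySem.Str.join "\n" (pvALoop lines [] false))
      = match lines.findIdx? (fun l => PySem.Str.strip l == "## Overview") with
        | none => ""
        | some i =>
          PySem.Str.join "\n"
            ((lines.take (match (lines.drop (i+1)).findIdx? (fun l => PySem.Str.startswith l "### ") with
                          | none => lines.length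
                          | some k => i + 1 + k)).drop i) := by
  rw [pv_econv]
  induction lines with
  | nil => simp [pvALoop]
  | cons l ls ih =>
    by_cases hp : (PySem.Str.strip l == "## Overview") = true
    · simp only [pvALoop, hp, if_true, List.findIdx?_cons]
      rw [pvALoop_true, pv_takeWhile_eq]
      simp only [List.nil_append, List.drop_succ_cons, List.drop_zero, List.length_cons, Nat.zero_add]
      generalize List.findIdx? (fun l => PySem.Chars.startswith l.toList ['#', '#', '#', ' ']) ls = o
      cases o with
      | none => simp
      | some k => simp [List.take_succ_cons, Nat.add_comm 1 k]
    · have hstep : pvALoop (l :: ls) [] false = pvALoop ls [] false := by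
        simp [pvALoop, hp]
      rw [hstep, ih]
      simp only [List.findIdx?_cons, hp, Bool.false_eq_true, if_false]
      cases h : List.findIdx? (fun l => PySem.Str.strip l == "## Overview") ls with
      | none => simp
      | some i =>
        simp only [Option.map_some]
        simp only [List.drop_succ_cons, List.length_cons]
        cases h2 : List.findIdx? (fun l => PySem.Chars.startswith l.toList ['#', '#', '#', ' ']) (ls.drop (i+1)) with
        | none => simp [List.take_succ_cons, List.drop_succ_cons]
        | some k =>
          have e : i + 1 + 1 + k = (i + 1 + k) + 1 := by omega
          simp [e, List.take_succ_cons, List.drop_succ_cons]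

-- ===== VERDICT (by name: the statement is the Claim_ definition above) =====
theorem extract_overview_for_h3_py_spec : Claim_equal_extract_overview_for_h3_py := by
  intro text _
  unfold Spec_extract_overview_for_h3_py extract_overview_for_h3_py extract_overview_for_h3_py_alt
  exact pv_core _
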